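-- pv_equiv track=rewrite | github.com/nishio/atcoder | dp/b.py | solve
-- ===== SOURCE A (Python) =====
-- def solve(N, K, heights):
--     costs = [0] * N
--     costs[0] = 0
--     for i in range(1, N):
--         costs[i] = min(
--             costs[j] + abs(heights[i] - heights[j])
--             for j in range(max(i - K, 0), i)
--         )
--
--     return costs[-1]
-- ===== SOURCE B (Python) =====
-- def solve(N, K, heights):
--     # Forward "push" DP: relax every edge (i, j) with i < j <= i+K going forward.
--     costs = [None] * N          # None = not yet reachable
--     costs[0] = 0
--     for i in range(N):
--         ci = costs[i]
--         if ci is None: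
--             continue
--         for j in range(i + 1, min(i + K + 1, N)):
--             c = ci + abs(heights[i] - heights[j])
--             if costs[j] is None or c < costs[j]:
--                 costs[j] = c
--     return costs[-1]
-- ===== Notes on version B (the rewrite author's own statement) =====
-- stated objective: alternative
-- what changed: Replaces the backward 'pull' DP (each cell takes a min over its K-window of predecessors via a min() over a generator) by a forward 'push' DP that starts from an all-unreachable array and relaxes every outgoing edge (i, j), j in (i, i+K], propagating minima forward.
import Mathlib
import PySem

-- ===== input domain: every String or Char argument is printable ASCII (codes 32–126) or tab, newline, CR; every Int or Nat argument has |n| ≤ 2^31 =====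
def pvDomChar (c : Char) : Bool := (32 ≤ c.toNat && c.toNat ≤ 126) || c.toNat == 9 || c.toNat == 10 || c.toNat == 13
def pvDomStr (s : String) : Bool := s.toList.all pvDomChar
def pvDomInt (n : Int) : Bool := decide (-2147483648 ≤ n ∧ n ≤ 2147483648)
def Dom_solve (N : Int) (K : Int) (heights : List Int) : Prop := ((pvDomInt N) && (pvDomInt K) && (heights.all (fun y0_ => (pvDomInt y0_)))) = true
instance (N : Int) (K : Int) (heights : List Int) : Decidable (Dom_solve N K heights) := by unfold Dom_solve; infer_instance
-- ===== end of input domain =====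

-- B replaces A's backward "pull" DP (each cell takes min() over its K-window of
-- predecessors) by a forward "push" DP that relaxes every outgoing edge (i, j),
-- i < j ≤ i+K, over an initially-unreachable array (alternative decomposition,
-- same asymptotic cost).

-- ===== PORT A =====
-- loop body of A: costs[i] = min(costs[j] + abs(heights[i] - heights[j]) for j in range(max(i-K,0), i)).
-- The .getD 0 on min? is min()'s ValueError on an empty generator, excluded by Pre_solve.
def stepA (K : Int) (heights : List Int) (cs : List Int) (i : Int) : List Int :=
  PySem.List.pySetD cs i
    ((PySem.List.min?
        ((PySem.List.pyRange (max (i - K) 0) i 1).map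
          (fun j => PySem.List.pyGetD cs j 0 +
            |PySem.List.pyGetD heights i 0 - PySem.List.pyGetD heights j 0|))
        (fun v => v)).getD 0)

def solve (N : Int) (K : Int) (heights : List Int) : Int :=
  let costs := (List.replicate N.toNat (0 : Int)).set 0 0   -- costs = [0]*N; costs[0] = 0 (IndexError for N ≤ 0: Pre_solve)
  let costs := (PySem.List.pyRange 1 N 1).foldl (stepA K heights) costs
  PySem.List.pyGetD costs (-1) 0   -- costs[-1]

-- ===== PORT B =====
-- inner loop body of B: relax edge (i, j) with cost c = ci + abs(heights[i] - heights[j])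
def stepBin (heights : List Int) (ci : Int) (i : Int) (cs2 : List (Option Int)) (j : Int) : List (Option Int) :=
  let c := ci + |PySem.List.pyGetD heights i 0 - PySem.List.pyGetD heights j 0|
  match PySem.List.pyGetD cs2 j none with
  | none => PySem.List.pySetD cs2 j (some c)
  | some cj => if c < cj then PySem.List.pySetD cs2 j (some c) else cs2

-- outer loop body of B: skip unreachable i, else push to all successors
def stepB (K : Int) (heights : List Int) (N : Int) (cs : List (Option Int)) (i : Int) : List (Option Int) :=
  match PySem.List.pyGetD cs i none with
  | none => cs
  | some ci => (PySem.List.pyRange (i + 1) (min (i + K + 1) N) 1).foldl (stepBin heights ci i) cs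

def solve_alt (N : Int) (K : Int) (heights : List Int) : Int :=
  let costs := (List.replicate N.toNat (none : Option Int)).set 0 (some 0)  -- costs = [None]*N; costs[0] = 0
  let costs := (PySem.List.pyRange 0 N 1).foldl (stepB K heights N) costs
  (PySem.List.pyGetD costs (-1) none).getD 0   -- costs[-1]; an int (some _) on every input of Pre_solve

-- ===== PRECONDITION & SPEC =====
-- Exactly the inputs on which Python A returns: N ≥ 1 (else IndexError on costs[0] / costs[-1]),
-- heights long enough for the indices 0..N-1 (else IndexError), and K ≥ 1 whenever the
-- loop body runs, i.e. N ≥ 2 (else min() over an empty generator raises ValueError).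
def Pre_solve (N : Int) (K : Int) (heights : List Int) : Prop :=
  1 ≤ N ∧ N ≤ (heights.length : Int) ∧ (2 ≤ N → 1 ≤ K)
instance (N : Int) (K : Int) (heights : List Int) : Decidable (Pre_solve N K heights) := by
  unfold Pre_solve; infer_instance

def pvWitness_solve : Int × Int × List Int := (4, 2, [10, 30, 40, 20])

def Spec_solve (N : Int) (K : Int) (heights : List Int) (out : Int) : Prop := out = solve_alt N K heights
instance (N : Int) (K : Int) (heights : List Int) (out : Int) : Decidable (Spec_solve N K heights out) := by unfold Spec_solve; infer_instance

-- ===== CLAIM (what is proved, stated in full; the proofs are below) =====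
def Claim_equal_solve : Prop := ∀ (N : Int) (K : Int) (heights : List Int), Dom_solve N K heights → Pre_solve N K heights → Spec_solve N K heights (solve N K heights)

-- ===== LEMMAS AND PROOFS =====

-- The mathematical DP both programs compute: dpl K h n lists the first n+1 DP values
-- (dpv K h m = min cost to reach stone m; dpv K h 0 = 0).
def dpl (K : Int) (h : List Int) : Nat → List Int
  | 0 => [0]
  | n + 1 =>
    let p := dpl K h n
    p ++ [((PySem.List.min?
        ((PySem.List.pyRange (max ((n + 1 : Nat) - K) 0) (n + 1 : Nat) 1).map
          (fun j : Int => p.getD j.toNat 0 + |h.getD (n + 1) 0 - h.getD j.toNat 0|))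
        (fun v => v)).getD 0)]

def dpv (K : Int) (h : List Int) (m : Nat) : Int := (dpl K h m).getD m 0

lemma dpl_length (K : Int) (h : List Int) (n : Nat) : (dpl K h n).length = n + 1 := by
  induction n with
  | zero => rfl
  | succ n ih => simp [dpl, ih]

lemma dpl_getD (K : Int) (h : List Int) {m n : Nat} (hmn : m ≤ n) :
    (dpl K h n).getD m 0 = dpv K h m := by
  induction n with
  | zero => interval_cases m; rfl
  | succ n ih =>
    rcases Nat.lt_or_ge m (n+1) with hm | hm
    · rw [← ih (Nat.lt_succ_iff.mp hm)]
      rw [dpl]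
      simp only [List.getD, List.getElem?_append_left (by rw [dpl_length]; omega : m < (dpl K h n).length)]
    · have : m = n + 1 := by omega
      subst this; rfl

-- ===== A-side: the pull loop fills the DP table from the left =====

lemma A_fold (K : Int) (h : List Int) (n : Nat) (hn : 1 ≤ n) :
    ∀ t : Nat, t < n →
      (PySem.List.pyRange 1 ((t : Int) + 1) 1).foldl (stepA K h)
          ((List.replicate n (0 : Int)).set 0 0)
        = dpl K h t ++ List.replicate (n - (t + 1)) 0 := by
  intro t
  induction t with
  | zero =>
    intro _
    rw [PySem.List.pyRange_one_eq_nil (by norm_num)]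
    simp only [List.foldl_nil, List.set_replicate_self]
    rw [show n = 1 + (n - 1) by omega, List.replicate_add]
    simp [dpl]
  | succ t ih =>
    intro ht
    rw [show (((t+1:Nat)) : Int) + 1 = ((t:Int) + 1) + 1 by push_cast; ring,
      PySem.List.pyRange_one_succ_right (by omega), List.foldl_append,
      ih (by omega)]
    set p := dpl K h t with hp
    have hplen : p.length = t + 1 := dpl_length K h t
    have hrep : n - (t + 1) = (n - (t+2)) + 1 := by omega
    -- evaluate the step at i = t+1
    show stepA K h (p ++ List.replicate (n - (t + 1)) 0) ((t:Int) + 1) = _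
    unfold stepA
    rw [PySem.List.pySetD_of_nonneg _ _ (by omega)]
    have hmapeq :
        ((PySem.List.pyRange (max (((t:Int) + 1) - K) 0) ((t:Int) + 1) 1).map
          (fun j => PySem.List.pyGetD (p ++ List.replicate (n - (t + 1)) 0) j 0 +
            |PySem.List.pyGetD h ((t:Int) + 1) 0 - PySem.List.pyGetD h j 0|))
        = ((PySem.List.pyRange (max (((t+1:Nat)) - K) 0) ((t+1:Nat)) 1).map
          (fun j : Int => p.getD j.toNat 0 + |h.getD (t + 1) 0 - h.getD j.toNat 0|)) := by
      have hcast : ((t:Int) + 1) = (((t+1 : Nat) : Int)) := by push_cast; ring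
      rw [hcast]
      apply List.map_congr_left
      intro j hj
      rw [PySem.List.mem_pyRange_one] at hj
      have hj0 : 0 ≤ j := le_trans (le_max_right _ _) hj.1
      have hjlt : j.toNat < t + 1 := by omega
      simp only [PySem.List.pyGetD_of_nonneg _ _ hj0, PySem.List.pyGetD_natCast,
        List.getD_append _ _ _ _ (show j.toNat < p.length by omega)]
    rw [hmapeq, show ((t:Int) + 1).toNat = p.length by omega, hrep, List.replicate_succ]
    have hset : ∀ (v : Int) (k : Nat),
        (p ++ (0:Int) :: List.replicate k 0).set p.length v = (p ++ [v]) ++ List.replicate k 0 := by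
      intro v k; simp
    rw [hset, show (t + 1 + 1) = (t + 2) by omega]
    congr 1

theorem solve_eq_dpv (N K : Int) (heights : List Int) (hN : 1 ≤ N) :
    solve N K heights = dpv K heights (N.toNat - 1) := by
  obtain ⟨n, rfl⟩ : ∃ n : Nat, N = (n : Int) := ⟨N.toNat, by omega⟩
  have hn : 1 ≤ n := by omega
  unfold solve
  simp only [Int.toNat_natCast]
  rw [show (n : Int) = ((n - 1 : Nat) : Int) + 1 by omega]
  rw [A_fold K heights n hn (n - 1) (by omega)]
  have hlen : (dpl K heights (n - 1)).length = n := by rw [dpl_length]; omega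
  rw [show n - (n - 1 + 1) = 0 by omega]
  simp only [List.replicate_zero, List.append_nil]
  rw [PySem.List.pyGetD_neg_one _ _ (by intro hc; rw [hc] at hlen; simp at hlen; omega)]
  rw [List.getLast_eq_getElem]
  unfold dpv
  rw [List.getD_eq_getElem _ _ (by omega)]
  congr 1
  omega

-- ===== B-side: invariant for the push loop =====

-- B's relaxation of one cell
def relax (o : Option Int) (c : Int) : Option Int :=
  match o with
  | none => some c
  | some cj => some (if c < cj then c else cj)

-- partial minimum over the processed part of j's predecessor window after t outer steps
def pm (K : Int) (h : List Int) (t j : Nat) : Option Int :=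
  ((PySem.List.pyRange (max ((j : Int) - K) 0) (min (j : Int) (t : Int)) 1).map
    (fun i : Int => dpv K h i.toNat + |h.getD i.toNat 0 - h.getD j 0|)).foldl relax none

lemma getD_set_char {α : Type} (xs : List (Option α)) (n m : Nat) (v : Option α)
    (hn : n < xs.length) :
    (xs.set n v).getD m none = if m = n then v else xs.getD m none := by
  by_cases hm : m = n
  · subst hm
    simp [List.getD, hn]
  · simp [List.getD, List.getElem?_set_ne (by omega : n ≠ m), hm]

lemma foldl_relax_some (l : List Int) (x : Int) :
    l.foldl relax (some x) = some (l.foldl min x) := by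
  induction l generalizing x with
  | nil => rfl
  | cons y t ih =>
    simp only [List.foldl_cons, relax, ih]
    have he : (if y < x then y else x) = min x y := by simp [min_def]; split_ifs <;> omega
    rw [he]

lemma pm_full (K : Int) (h : List Int) {t j : Nat} (hj : 1 ≤ j) (hjt : j ≤ t) (hK : 1 ≤ K) :
    pm K h t j = some (dpv K h j) := by
  unfold pm
  rw [show min (j : Int) (t : Int) = ((j - 1 : Nat) : Int) + 1 by omega]
  -- the B-side window, rewritten to the A-side weight orientation and dpv values
  have hcongr :
      ((PySem.List.pyRange (max ((j : Int) - K) 0) (((j - 1 : Nat) : Int) + 1) 1).map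
        (fun i : Int => dpv K h i.toNat + |h.getD i.toNat 0 - h.getD j 0|))
      = ((PySem.List.pyRange (max (((j - 1 : Nat) + 1 : Nat) - K) 0) (((j - 1 : Nat) + 1 : Nat)) 1).map
        (fun i : Int => (dpl K h (j - 1)).getD i.toNat 0 + |h.getD ((j-1) + 1) 0 - h.getD i.toNat 0|)) := by
    rw [show ((((j - 1 : Nat) + 1 : Nat)) : Int) = ((j - 1 : Nat) : Int) + 1 by push_cast; ring,
      show ((j - 1 : Nat) : Int) + 1 - K = ((j : Int)) - K by omega]
    apply List.map_congr_left
    intro i hi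
    rw [PySem.List.mem_pyRange_one] at hi
    have hi0 : 0 ≤ i := le_trans (le_max_right _ _) hi.1
    rw [dpl_getD K h (by omega : i.toNat ≤ j - 1), show (j - 1) + 1 = j by omega,
      abs_sub_comm]
  rw [hcongr]
  -- evaluate both sides on the nonempty window
  have hne : max (((j - 1 : Nat) + 1 : Nat) - K : Int) 0 < (((j - 1 : Nat) + 1 : Nat) : Int) := by
    push_cast; omega
  rw [PySem.List.pyRange_one_cons hne, List.map_cons, List.foldl_cons]
  show List.foldl relax (relax none _) _ = _
  rw [show ∀ c, relax none c = some c from fun _ => rfl, foldl_relax_some]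
  -- dpv side
  have hdpv : dpv K h j = dpv K h ((j - 1) + 1) := by congr 1; omega
  rw [hdpv]
  unfold dpv
  conv_rhs => rw [dpl]
  rw [List.getD_append_right _ _ _ _ (by simp [dpl_length])]
  rw [dpl_length]
  rw [show (j - 1) + 1 - (j - 1 + 1) = 0 by omega]
  simp only [List.getD_cons_zero]
  rw [PySem.List.pyRange_one_cons hne, List.map_cons, PySem.List.min?_id_cons]
  rfl

lemma stepBin_length (heights : List Int) (ci i : Int) (cs : List (Option Int)) (j : Int) :
    (stepBin heights ci i cs j).length = cs.length := by
  simp only [stepBin]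
  split
  · exact PySem.List.length_pySetD _ _ _
  · split
    · exact PySem.List.length_pySetD _ _ _
    · rfl

lemma relax_of_getD (heights : List Int) (ci i : Int) (cs : List (Option Int)) (a : Int)
    (ha : 0 ≤ a) (hlt : a.toNat < cs.length) (m : Nat) :
    (stepBin heights ci i cs a).getD m none =
      if (m : Int) = a then relax (cs.getD m none)
          (ci + |PySem.List.pyGetD heights i 0 - PySem.List.pyGetD heights a 0|)
        else cs.getD m none := by
  have hma : ((m : Int) = a) ↔ (m = a.toNat) := by omega
  simp only [stepBin, PySem.List.pyGetD_of_nonneg _ _ ha, PySem.List.pySetD_of_nonneg _ _ ha]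
  rcases hcs : cs.getD a.toNat none with _ | cj
  · by_cases hm : m = a.toNat
    · simp only [getD_set_char _ _ _ _ hlt, hm, hcs, relax]
      simp [Int.toNat_of_nonneg ha]
    · simp only [getD_set_char _ _ _ _ hlt, if_neg hm, if_neg (fun hh => hm (hma.mp hh))]
  · by_cases hm : m = a.toNat
    · subst hm
      rw [if_pos (hma.mpr rfl), hcs]
      dsimp only
      split_ifs with hlt2
      · rw [getD_set_char _ _ _ _ hlt]
        simp only [relax, List.getD] at hlt2 ⊢
        simp [hlt2]
      · simp only [relax, List.getD] at hlt2 hcs ⊢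
        simp [hlt2, hcs]
    · rw [if_neg (fun hh => hm (hma.mp hh))]
      dsimp only
      split_ifs with hlt2
      · rw [getD_set_char _ _ _ _ hlt, if_neg hm]
      · rfl

lemma innerB_length (heights : List Int) (ci i : Int) (l : List Int) (cs : List (Option Int)) :
    (l.foldl (stepBin heights ci i) cs).length = cs.length := by
  induction l generalizing cs with
  | nil => rfl
  | cons x t ih => rw [List.foldl_cons, ih, stepBin_length]

lemma innerB_char (heights : List Int) (ci i : Int) (b : Int) :
    ∀ (k : Nat) (a : Int), (b - a).toNat = k → 0 ≤ a → ∀ (cs : List (Option Int)),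
      b ≤ (cs.length : Int) → ∀ (m : Nat),
      ((PySem.List.pyRange a b 1).foldl (stepBin heights ci i) cs).getD m none =
        if a ≤ (m : Int) ∧ (m : Int) < b then
          relax (cs.getD m none)
            (ci + |PySem.List.pyGetD heights i 0 - PySem.List.pyGetD heights (m : Int) 0|)
        else cs.getD m none := by
  intro k
  induction k with
  | zero =>
    intro a hk ha cs hb m
    rw [PySem.List.pyRange_one_eq_nil (by omega), List.foldl_nil]
    rw [if_neg (by omega)]
  | succ k ih =>
    intro a hk ha cs hb m
    rw [PySem.List.pyRange_one_cons (by omega), List.foldl_cons]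
    rw [ih (a + 1) (by omega) (by omega) _ (by rw [stepBin_length]; omega) m]
    rw [relax_of_getD heights ci i cs a ha (by omega) m]
    by_cases hm1 : (m : Int) = a
    · rw [if_neg (by omega), if_pos hm1, if_pos (by omega), hm1]
    · rw [if_neg hm1]
      by_cases hm2 : a + 1 ≤ (m : Int) ∧ (m : Int) < b
      · rw [if_pos hm2, if_pos (by omega)]
      · rw [if_neg hm2, if_neg (by omega)]

-- state of B's array after the first t outer iterations
def Bstate (K : Int) (h : List Int) (N : Int) (t : Nat) : List (Option Int) :=
  (PySem.List.pyRange 0 (t : Int) 1).foldl (stepB K h N)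
    ((List.replicate N.toNat (none : Option Int)).set 0 (some 0))

lemma B_fold (K : Int) (h : List Int) (N : Int) (hN : 1 ≤ N) (hK : 2 ≤ N → 1 ≤ K) :
    ∀ t : Nat, (t : Int) ≤ N →
      (Bstate K h N t).length = N.toNat ∧
      (Bstate K h N t).getD 0 none = some 0 ∧
      (∀ j : Nat, 1 ≤ j → (j : Int) < N → (Bstate K h N t).getD j none = pm K h t j) := by
  intro t
  induction t with
  | zero =>
    intro _
    unfold Bstate
    rw [PySem.List.pyRange_one_eq_nil (by omega), List.foldl_nil]
    refine ⟨by simp, ?_, ?_⟩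
    · rw [getD_set_char _ _ _ _ (by simp; omega), if_pos rfl]
    · intro j hj hjn
      rw [getD_set_char _ _ _ _ (by simp; omega), if_neg (by omega)]
      rw [List.getD_eq_getElem?_getD, List.getElem?_replicate]
      unfold pm
      rw [show min (j : Int) ((0:Nat) : Int) = 0 by omega,
        PySem.List.pyRange_one_eq_nil (le_max_right _ _), List.map_nil, List.foldl_nil]
      split_ifs <;> rfl
  | succ t ih =>
    intro ht
    obtain ⟨ihlen, ih0, ihj⟩ := ih (by omega)
    have hstate : Bstate K h N (t + 1) = stepB K h N (Bstate K h N t) (t : Int) := by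
      unfold Bstate
      rw [show ((t + 1 : Nat) : Int) = (t : Int) + 1 by push_cast; ring,
        PySem.List.pyRange_one_succ_right (by omega), List.foldl_append, List.foldl_cons,
        List.foldl_nil]
    have hci : (Bstate K h N t).getD t none = some (dpv K h t) := by
      rcases Nat.eq_zero_or_pos t with h0 | h1
      · subst h0; exact ih0
      · rw [ihj t h1 (by omega)]
        exact pm_full K h h1 (le_refl t) (hK (by omega))
    have hstep : stepB K h N (Bstate K h N t) (t : Int) =
        (PySem.List.pyRange ((t : Int) + 1) (min ((t : Int) + K + 1) N) 1).foldl
          (stepBin h (dpv K h t) (t : Int)) (Bstate K h N t) := by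
      unfold stepB
      rw [PySem.List.pyGetD_of_nonneg _ _ (by omega), Int.toNat_natCast, hci]
    rw [hstate, hstep]
    have hb : min ((t : Int) + K + 1) N ≤ ((Bstate K h N t).length : Int) := by
      rw [ihlen]; omega
    refine ⟨by rw [innerB_length, ihlen], ?_, ?_⟩
    · rw [innerB_char h (dpv K h t) (t : Int) _ _ ((t:Int) + 1) rfl (by omega) _ hb 0]
      rw [if_neg (by omega)]
      exact ih0
    · intro j hj hjn
      rw [innerB_char h (dpv K h t) (t : Int) _ _ ((t:Int) + 1) rfl (by omega) _ hb j]
      rw [ihj j hj hjn]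
      by_cases hc : (t : Int) + 1 ≤ (j : Int) ∧ (j : Int) < min ((t : Int) + K + 1) N
      · rw [if_pos hc]
        unfold pm
        rw [show min (j : Int) ((t + 1 : Nat) : Int) = (t : Int) + 1 by push_cast; omega,
          show min (j : Int) ((t : Nat) : Int) = (t : Int) by omega,
          PySem.List.pyRange_one_succ_right (by omega : max ((j:Int) - K) 0 ≤ (t:Int)),
          List.map_append, List.foldl_append]
        simp
      · rw [if_neg hc]
        unfold pm
        rcases Nat.lt_or_ge t j with htj | htj
        · -- j ≥ t+1 and (since hc fails while j < N) j ≥ t+K+1 : both windows empty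
          have hjK : (t : Int) + K + 1 ≤ (j : Int) := by omega
          rw [PySem.List.pyRange_one_eq_nil (by omega : min (j:Int) ((t+1 : Nat) : Int) ≤ max ((j:Int) - K) 0),
            PySem.List.pyRange_one_eq_nil (by omega : min (j:Int) ((t : Nat) : Int) ≤ max ((j:Int) - K) 0)]
        · rw [show min (j : Int) ((t + 1 : Nat) : Int) = min (j : Int) ((t : Nat) : Int) by push_cast; omega]

theorem solve_alt_eq_dpv (N K : Int) (heights : List Int) (hN : 1 ≤ N) (hK : 2 ≤ N → 1 ≤ K) :
    solve_alt N K heights = dpv K heights (N.toNat - 1) := by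
  obtain ⟨n, rfl⟩ : ∃ n : Nat, N = (n : Int) := ⟨N.toNat, by omega⟩
  have hn : 1 ≤ n := by omega
  obtain ⟨hlen, h0, hj⟩ := B_fold K heights (n : Int) hN hK n (le_refl _)
  unfold solve_alt
  show (PySem.List.pyGetD (Bstate K heights (n : Int) n) (-1) none).getD 0 = _
  have hlen' : (Bstate K heights (n : Int) n).length = n := by rw [hlen]; omega
  rw [PySem.List.pyGetD_neg_one _ _ (by intro hcon; rw [hcon] at hlen'; simp at hlen'; omega)]
  rw [List.getLast_eq_getElem, ← List.getD_eq_getElem _ none (by omega), hlen']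
  rcases Nat.lt_or_ge 1 n with h2 | h2
  · rw [hj (n - 1) (by omega) (by omega),
      pm_full K heights (by omega) (by omega) (hK (by omega))]
    simp only [Option.getD_some, Int.toNat_natCast]
  · have : n = 1 := by omega
    subst this
    simp only [show (1 : Nat) - 1 = 0 from rfl, h0]
    rfl

-- ===== VERDICT (by name: the statement is the Claim_ definition above) =====
theorem solve_spec : Claim_equal_solve := by
  intro N K heights _ hpre
  unfold Spec_solve
  rw [solve_eq_dpv N K heights hpre.1, solve_alt_eq_dpv N K heights hpre.1 hpre.2.2]
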